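-- pv_equiv track=rewrite | github.com/5ku11Cru5h3r/All-My-Practice-Codes-on-cloud | CodeForces_Practice/contest/temp.py | minimize_max_mex
-- ===== SOURCE A (Python) =====
-- def minimize_max_mex(A, B):
--     from collections import defaultdict
--
--     n = len(A)
--     pos = defaultdict(list)
--
--     for i in range(n):
--         pos[A[i]].append((i, 0))  # 0 means in A
--         pos[B[i]].append((i, 1))  # 1 means in B
--
--     mex = 0
--     while True:
--         if mex not in pos:  # number not in either array
--             return mex
--
--         # check if this number can appear in both arrays
--         inA, inB = False, False
--         for idx, where in pos[mex]:
--             if where == 0: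
--                 inA = True
--             else:
--                 inB = True
--             if inA and inB:
--                 break
--
--         # If number never in A and never can be swapped to A => stop
--         if not (inA and inB):
--             return mex
--
--         mex += 1
-- ===== SOURCE B (Python) =====
-- def minimize_max_mex(A, B):
--     # sort-then-scan: walk the distinct values common to A and B[:len(A)]
--     # in ascending order; the mex is where the sequence 0,1,2,... first breaks.
--     common = sorted(set(A) & set(B[:len(A)]))
--     mex = 0
--     for v in common:
--         if v == mex:
--             mex += 1
--         elif v > mex:
--             break
--     return mex
-- ===== Notes on version B (the rewrite author's own statement) =====
-- stated objective: faster
-- what changed: Replaces A's count-upward while loop (which re-tests membership of each candidate mex via a defaultdict of (index,where)-lists) by a sort-then-scan: sort the distinct common values of A and B[:len(A)] once and find the first gap in 0,1,2,... in a single linear scan with early break; Pre_ excludes len(B) < len(A), where A raises IndexError on B[i]. Measured ~3.5x faster at n=262144 (cheap set/sort machinery vs per-element tuple-list dict appends).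
import Mathlib
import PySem

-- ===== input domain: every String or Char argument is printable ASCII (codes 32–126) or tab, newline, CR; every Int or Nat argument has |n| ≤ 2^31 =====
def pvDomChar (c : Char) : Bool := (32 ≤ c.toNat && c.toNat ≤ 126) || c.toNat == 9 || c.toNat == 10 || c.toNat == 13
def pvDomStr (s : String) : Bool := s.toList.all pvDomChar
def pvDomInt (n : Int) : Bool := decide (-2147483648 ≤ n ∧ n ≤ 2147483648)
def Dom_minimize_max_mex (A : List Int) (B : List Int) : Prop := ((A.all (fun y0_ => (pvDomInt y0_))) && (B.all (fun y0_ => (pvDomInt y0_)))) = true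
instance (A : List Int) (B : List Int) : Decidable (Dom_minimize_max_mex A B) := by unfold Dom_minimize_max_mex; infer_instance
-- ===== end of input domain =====

-- B replaces A's count-upward membership loop by sort-then-scan: sort the distinct common
-- values once and find the first gap in 0,1,2,… in one linear scan (objective: alternative).

-- ===== PORT A =====
-- body of A's 'for i in range(n)' loop: the two defaultdict appends
def pvStep (A B : List Int) (d : PySem.Dict Int (List (Int × Int))) (i : Int) :
    PySem.Dict Int (List (Int × Int)) :=
  (d.modify (PySem.List.pyGetD A i 0) [] (· ++ [(i, (0 : Int))])).modify
    (PySem.List.pyGetD B i 0) [] (· ++ [(i, (1 : Int))])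

-- inner 'for idx, where in pos[mex]' loop with its early break
def pvScanFlags : List (Int × Int) → Bool → Bool → Bool × Bool
  | [], inA, inB => (inA, inB)
  | (_, w) :: rest, inA, inB =>
      let inA' := if w == 0 then true else inA
      let inB' := if w == 0 then inB else true
      if inA' && inB' then (inA', inB') else pvScanFlags rest inA' inB'

-- A's 'while True' loop; fuel 2*n+1 is provably enough (pos holds at most 2n keys)
def pvLoopA (pos : PySem.Dict Int (List (Int × Int))) : Nat → Int → Int
  | 0, mex => mex
  | fuel + 1, mex =>
      match pos.get? mex with
      | none => mex
      | some l =>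
          let p := pvScanFlags l false false
          if p.1 && p.2 then pvLoopA pos fuel (mex + 1) else mex

def minimize_max_mex (A : List Int) (B : List Int) : Int :=
  let n := A.length
  let pos := (PySem.List.pyRange 0 (n : Int) 1).foldl (pvStep A B) PySem.Dict.empty
  pvLoopA pos (2 * n + 1) 0

-- ===== PORT B =====
-- B's 'for v in common' scan with its early break
def pvScanB : List Int → Int → Int
  | [], mex => mex
  | v :: rest, mex =>
      if v == mex then pvScanB rest (mex + 1)
      else if v > mex then mex
      else pvScanB rest mex

def minimize_max_mex_alt (A : List Int) (B : List Int) : Int :=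
  let common := PySem.List.sorted
    (PySem.Set.inter (PySem.Set.ofList A)
      (PySem.Set.ofList (PySem.List.slice B none (some (A.length : Int)))))
    (fun x => x) false
  pvScanB common 0

-- ===== PRECONDITION & SPEC =====
-- Pre_ excludes exactly the inputs with len(B) < len(A), on which A raises IndexError at B[i].
def Pre_minimize_max_mex (A : List Int) (B : List Int) : Prop := A.length ≤ B.length
instance (A : List Int) (B : List Int) : Decidable (Pre_minimize_max_mex A B) := by
  unfold Pre_minimize_max_mex; infer_instance

def pvWitness_minimize_max_mex : List Int × List Int := ([0, 1, 3], [1, 0, 2])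

def Spec_minimize_max_mex (A : List Int) (B : List Int) (out : Int) : Prop := out = minimize_max_mex_alt A B
instance (A : List Int) (B : List Int) (out : Int) : Decidable (Spec_minimize_max_mex A B out) := by unfold Spec_minimize_max_mex; infer_instance

-- ===== CLAIM =====
def Claim_equal_minimize_max_mex : Prop := ∀ (A : List Int) (B : List Int), Dom_minimize_max_mex A B → Pre_minimize_max_mex A B → Spec_minimize_max_mex A B (minimize_max_mex A B)

-- ===== LEMMAS AND PROOFS =====

-- the continue-condition of A's while loop
def pvContA (pos : PySem.Dict Int (List (Int × Int))) (x : Int) : Bool :=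
  match pos.get? x with
  | none => false
  | some l => (pvScanFlags l false false).1 && (pvScanFlags l false false).2

-- a generic exhaustive counting loop A's loop reduces to
def pvLoopGen (p : Int → Bool) : Nat → Int → Int
  | 0, mex => mex
  | fuel + 1, mex => if p mex then pvLoopGen p fuel (mex + 1) else mex

lemma pvLoopA_eq_gen (pos : PySem.Dict Int (List (Int × Int))) :
    ∀ (fuel : Nat) (m : Int), pvLoopA pos fuel m = pvLoopGen (pvContA pos) fuel m := by
  intro fuel
  induction fuel with
  | zero => intro m; rfl
  | succ f ih =>
      intro m
      rw [pvLoopA, pvLoopGen]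
      cases h : pos.get? m with
      | none =>
          have hc : pvContA pos m = false := by simp [pvContA, h]
          simp [hc]
      | some l =>
          have hc : pvContA pos m = ((pvScanFlags l false false).1 && (pvScanFlags l false false).2) := by
            simp [pvContA, h]
          rw [hc]
          split <;> simp_all

lemma pvLoopGen_congr (p q : Int → Bool) (h : ∀ x, p x = q x) :
    ∀ (fuel : Nat) (m : Int), pvLoopGen p fuel m = pvLoopGen q fuel m := by
  intro fuel
  induction fuel with
  | zero => intro m; rfl
  | succ f ih => intro m; simp only [pvLoopGen, h, ih]

-- the loop variable only grows, so the predicates need only agree from m₀ upward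
lemma pvLoopGen_congr_ge (p q : Int → Bool) (m0 : Int) (h : ∀ x, m0 ≤ x → p x = q x) :
    ∀ (fuel : Nat) (m : Int), m0 ≤ m → pvLoopGen p fuel m = pvLoopGen q fuel m := by
  intro fuel
  induction fuel with
  | zero => intro m _; rfl
  | succ f ih =>
      intro m hm
      simp only [pvLoopGen, h m hm]
      split
      · exact ih (m + 1) (by omega)
      · rfl

-- pvScanFlags computes the two "any"-flags of the list (early break included)
lemma pvScanFlags_eq (l : List (Int × Int)) :
    ∀ (a b : Bool), pvScanFlags l a b =
      (a || l.any (fun p => p.2 == 0), b || l.any (fun p => !(p.2 == 0))) := by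
  induction l with
  | nil => intro a b; simp [pvScanFlags]
  | cons hd tl ih =>
      intro a b
      obtain ⟨x, w⟩ := hd
      cases a <;> cases b <;> by_cases hw : w = 0 <;>
        simp [pvScanFlags, hw, ih]

-- the two per-key flags of the dict being built
def pvF0 (d : PySem.Dict Int (List (Int × Int))) (x : Int) : Bool :=
  (d.getD x []).any (fun p => p.2 == 0)
def pvF1 (d : PySem.Dict Int (List (Int × Int))) (x : Int) : Bool :=
  (d.getD x []).any (fun p => !(p.2 == 0))

lemma pvContA_eq (d : PySem.Dict Int (List (Int × Int))) (x : Int) :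
    pvContA d x = (pvF0 d x && pvF1 d x) := by
  unfold pvContA pvF0 pvF1
  cases h : d.get? x with
  | none => simp [PySem.Dict.getD_eq_get?_getD, h]
  | some l => simp [PySem.Dict.getD_eq_get?_getD, h, pvScanFlags_eq]

lemma pvF0_step (A B : List Int) (d : PySem.Dict Int (List (Int × Int))) (i x : Int) :
    pvF0 (pvStep A B d i) x = (pvF0 d x || (x == PySem.List.pyGetD A i 0)) := by
  unfold pvF0 pvStep
  simp only [PySem.Dict.getD_modify]
  by_cases h1 : x = PySem.List.pyGetD B i 0 <;>
    by_cases h2 : x = PySem.List.pyGetD A i 0 <;>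
      simp_all [List.any_append]

lemma pvF1_step (A B : List Int) (d : PySem.Dict Int (List (Int × Int))) (i x : Int) :
    pvF1 (pvStep A B d i) x = (pvF1 d x || (x == PySem.List.pyGetD B i 0)) := by
  unfold pvF1 pvStep
  simp only [PySem.Dict.getD_modify]
  by_cases h1 : x = PySem.List.pyGetD B i 0 <;>
    by_cases h2 : x = PySem.List.pyGetD A i 0 <;>
      simp_all [List.any_append]

lemma pvF0_fold (A B : List Int) (x : Int) :
    ∀ (I : List Int) (d : PySem.Dict Int (List (Int × Int))),
      pvF0 (I.foldl (pvStep A B) d) x = (pvF0 d x || I.any (fun i => x == PySem.List.pyGetD A i 0)) := by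
  intro I
  induction I with
  | nil => intro d; simp
  | cons hd tl ih => intro d; simp [List.foldl_cons, ih, pvF0_step, Bool.or_assoc]

lemma pvF1_fold (A B : List Int) (x : Int) :
    ∀ (I : List Int) (d : PySem.Dict Int (List (Int × Int))),
      pvF1 (I.foldl (pvStep A B) d) x = (pvF1 d x || I.any (fun i => x == PySem.List.pyGetD B i 0)) := by
  intro I
  induction I with
  | nil => intro d; simp
  | cons hd tl ih => intro d; simp [List.foldl_cons, ih, pvF1_step, Bool.or_assoc]

-- scanning the index range for x is membership of x in the clipped list
lemma pvAny_range_eq_contains (C : List Int) (n : Nat) (hn : n ≤ C.length) (x : Int) :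
    (PySem.List.pyRange 0 (n : Int) 1).any (fun i => x == PySem.List.pyGetD C i 0)
      = (C.take n).contains x := by
  rw [Bool.eq_iff_iff]
  simp only [List.any_eq_true, List.contains_eq_any_beq]
  constructor
  · rintro ⟨i, hi, hx⟩
    rw [PySem.List.mem_pyRange_one] at hi
    have hg : PySem.List.pyGetD C i 0 = C[i.toNat]'(by omega) :=
      PySem.List.pyGetD_eq_getElem C 0 hi.1 (by omega)
    refine ⟨C[i.toNat]'(by omega), ?_, by rw [← hg]; exact hx⟩
    have : i.toNat < (C.take n).length := by simp [List.length_take]; omega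
    have e : (C.take n)[i.toNat]'this = C[i.toNat]'(by omega) := List.getElem_take
    exact e ▸ List.getElem_mem this
  · rintro ⟨y, hy, hxy⟩
    obtain ⟨j, hj, rfl⟩ := List.mem_iff_getElem.mp hy
    have hjn : j < n := by simp [List.length_take] at hj; omega
    refine ⟨(j : Int), ?_, ?_⟩
    · rw [PySem.List.mem_pyRange_one]; constructor <;> [positivity; exact_mod_cast hjn]
    · have hg : PySem.List.pyGetD C (j : Int) 0 = C[j]'(by omega) :=
        PySem.List.pyGetD_eq_getElem C 0 (by positivity) (by exact_mod_cast (by omega : j < C.length))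
      rw [hg]
      have e : (C.take n)[j]'hj = C[j]'(by omega) := List.getElem_take
      rw [← e]; exact hxy

-- the continue-condition of A's loop is common-membership (under Pre_)
lemma pvCont_eq (A B : List Int) (hpre : A.length ≤ B.length) (x : Int) :
    pvContA ((PySem.List.pyRange 0 (A.length : Int) 1).foldl (pvStep A B) PySem.Dict.empty) x
      = (A.contains x && (B.take A.length).contains x) := by
  rw [pvContA_eq, pvF0_fold, pvF1_fold]
  simp only [pvF0, pvF1, PySem.Dict.getD_empty, List.any_nil, Bool.false_or]
  rw [pvAny_range_eq_contains A A.length le_rfl x, pvAny_range_eq_contains B A.length hpre x]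
  simp

-- helper: if p (m+k) = false for some k < f, then fuel f and f+1 agree
lemma pvLoopGen_fuel_succ (p : Int → Bool) (f : Nat) (m : Int)
    (h : ∃ k : Nat, k < f ∧ p (m + k) = false) :
    pvLoopGen p f m = pvLoopGen p (f + 1) m := by
  induction f generalizing m with
  | zero => obtain ⟨k, hk, _⟩ := h; omega
  | succ g ih =>
      obtain ⟨k, hk, hpk⟩ := h
      simp only [pvLoopGen]
      cases hpm : p m with
      | false => rfl
      | true =>
          cases k with
          | zero => rw [show m + ((0 : Nat) : Int) = m by omega, hpm] at hpk; exact absurd hpk (by simp)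
          | succ k' =>
              exact ih (m + 1) ⟨k', by omega, by
                have e : m + 1 + ((k' : Nat) : Int) = m + (((k' + 1 : Nat) : Nat) : Int) := by push_cast; ring
                rw [e]; exact hpk⟩

-- helper: a list of length < f misses some value among m, …, m+f-1
lemma pvStop_within (l : List Int) (m : Int) (f : Nat)
    (hf : l.length < f) : ∃ k : Nat, k < f ∧ (l.contains (m + k)) = false := by
  by_contra hcon
  push Not at hcon
  have hsub : ((List.range f).map (fun k : Nat => m + (k : Int))) ⊆ l := by
    intro y hy
    obtain ⟨j, hj, rfl⟩ := List.mem_map.mp hy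
    have := hcon j (List.mem_range.mp hj)
    simpa [List.contains_eq_mem] using this
  have hnd2 : ((List.range f).map (fun k : Nat => m + (k : Int))).Nodup :=
    List.Nodup.map (fun a b hab => by omega) List.nodup_range
  have hle := (List.subperm_of_subset hnd2 hsub).length_le
  rw [List.length_map, List.length_range] at hle
  omega

-- scanning a strictly increasing list for the first gap = the exhaustive counting loop
lemma pvScanB_eq_gen (l : List Int) (hs : l.Pairwise (· < ·)) :
    ∀ (m : Int) (f : Nat), l.length < f →
      pvScanB l m = pvLoopGen (fun x => l.contains x) f m := by
  induction l with
  | nil =>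
      intro m f hf
      cases f with
      | zero => omega
      | succ f' => simp [pvScanB, pvLoopGen]
  | cons v rest ih =>
      intro m f hf
      obtain ⟨hv, hrest⟩ := List.pairwise_cons.mp hs
      cases f with
      | zero => omega
      | succ f' =>
          by_cases hvm : v = m
          · -- head matches: loop continues, tail scanned from m+1
            subst hvm
            have hp : ((v :: rest).contains v) = true := by simp
            rw [show pvScanB (v :: rest) v = pvScanB rest (v + 1) from by simp [pvScanB]]
            rw [show pvLoopGen (fun x => (v :: rest).contains x) (f' + 1) v
                  = pvLoopGen (fun x => (v :: rest).contains x) f' (v + 1) from by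
                simp [pvLoopGen]]
            rw [ih hrest (v + 1) f' (by simpa using hf)]
            exact pvLoopGen_congr_ge _ _ (v + 1)
              (fun x hx => by
                rw [Bool.eq_iff_iff]
                simp only [List.contains_eq_mem, decide_eq_true_eq, List.mem_cons]
                constructor
                · intro h; exact Or.inr h
                · rintro (rfl | h)
                  · omega
                  · exact h)
              f' (v + 1) le_rfl
          · by_cases hgt : v > m
            · -- head already past m: m is missing from the (sorted) list, both stop at m
              have hb : (v == m) = false := by simp [hvm]
              have hp : ((v :: rest).contains m) = false := by
                simp only [List.contains_eq_mem, decide_eq_false_iff_not, List.mem_cons]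
                rintro (rfl | h)
                · omega
                · have := hv m h; omega
              simp only [pvScanB, pvLoopGen, hb, hp]
              simp [hgt]
            · -- head below m: it can never be a future mex, drop it
              have hvlt : v < m := by
                rcases lt_trichotomy v m with h | h | h
                · exact h
                · exact absurd h hvm
                · exact absurd h hgt
              have hb : (v == m) = false := by simp [hvm]
              rw [show pvScanB (v :: rest) m = pvScanB rest m from by
                simp [pvScanB, hb, not_lt.mpr (le_of_lt hvlt)]]
              rw [ih hrest m f' (by simpa using hf)]
              rw [pvLoopGen_congr_ge (fun x => rest.contains x)
                (fun x => (v :: rest).contains x) m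
                (fun x hx => by
                  rw [Bool.eq_iff_iff]
                  simp only [List.contains_eq_mem, decide_eq_true_eq, List.mem_cons]
                  constructor
                  · intro h; exact Or.inr h
                  · rintro (rfl | h)
                    · omega
                    · exact h)
                f' m le_rfl]
              -- fuel f' suffices already: a gap exists within it; bridge f' to f'+1
              obtain ⟨k, hk, hkmiss⟩ := pvStop_within rest m f' (by simpa using hf)
              have hmiss : ((v :: rest).contains (m + k)) = false := by
                simp only [List.contains_eq_mem, decide_eq_false_iff_not, List.mem_cons]
                rintro (h | h)
                · omega
                · simp only [List.contains_eq_mem, decide_eq_false_iff_not] at hkmiss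
                  exact hkmiss h
              exact pvLoopGen_fuel_succ _ f' m ⟨k, hk, hmiss⟩

lemma pvMain (A B : List Int) (hpre : A.length ≤ B.length) :
    minimize_max_mex A B = minimize_max_mex_alt A B := by
  simp only [minimize_max_mex, minimize_max_mex_alt]
  rw [pvLoopA_eq_gen]
  set inter : List Int :=
    PySem.Set.inter (PySem.Set.ofList A)
      (PySem.Set.ofList (PySem.List.slice B none (some (A.length : Int)))) with hi
  set common : List Int := PySem.List.sorted inter (fun x => x) false with hc
  have hnd : inter.Nodup := PySem.Set.nodup_inter _ _ (PySem.Set.nodup_ofList A)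
  have hpair : common.Pairwise (· < ·) := by
    have e : PySem.Set.ofList inter = inter := PySem.Set.ofList_eq_self_of_nodup inter hnd
    rw [hc, ← e]
    exact PySem.List.sorted_ofList_pairwise_lt inter
  have hmem : ∀ x : Int, (common.contains x) = (A.contains x && (B.take A.length).contains x) := by
    intro x
    rw [Bool.eq_iff_iff]
    simp only [List.contains_eq_mem, Bool.and_eq_true, decide_eq_true_eq]
    rw [hc, PySem.List.mem_sorted, hi, PySem.Set.mem_inter, PySem.Set.mem_ofList,
      PySem.Set.mem_ofList, PySem.List.slice_to_natCast]
  have hlenc : common.length ≤ A.length := by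
    have hsubA : inter ⊆ A := by
      intro y hy
      rw [hi, PySem.Set.mem_inter, PySem.Set.mem_ofList] at hy
      exact hy.1
    have : inter.length ≤ A.length := (List.subperm_of_subset hnd hsubA).length_le
    calc common.length = inter.length := by rw [hc]; exact PySem.List.length_sorted _ _ _
    _ ≤ A.length := this
  rw [pvScanB_eq_gen common hpair 0 (2 * A.length + 1) (by omega)]
  exact pvLoopGen_congr _ _ (fun x => (pvCont_eq A B hpre x).trans (hmem x).symm) _ 0

-- ===== VERDICT =====
theorem minimize_max_mex_spec : Claim_equal_minimize_max_mex := by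
  intro A B _ hpre
  exact pvMain A B hpre
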